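-- pv_equiv track=rewrite | github.com/DariMasureva/SoftUni_projects | fundamentals_solutions/mid_exam_prep/destination_mapper.py | separate_destinations
-- ===== SOURCE A (Python) =====
-- def separate_destinations(string_given):
--     equal_expected = False
--     slash_expected = False
--     expected_symbol_idx = 0
--     destination_list = []
--
--     for idx, symbol in enumerate(string_given):
--
--         if symbol == "=" and not slash_expected and not equal_expected:
--             expected_symbol_idx = idx + 1
--             equal_expected = True
--
--         elif symbol == "=" and slash_expected:
--             slash_expected = False
--             equal_expected = True
--             expected_symbol_idx = idx + 1
--
--         elif symbol == "=" and equal_expected: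
--             cur_destination = string_given[expected_symbol_idx:idx]
--             destination_list.append(cur_destination)
--             expected_symbol_idx = idx + 1
--
--         if symbol == "/" and not slash_expected and not equal_expected:
--             expected_symbol_idx = idx + 1
--             slash_expected = True
--
--         elif symbol == "/" and equal_expected:
--             equal_expected = False
--             slash_expected = True
--             expected_symbol_idx = idx + 1
--
--         elif symbol == "/" and slash_expected:
--             cur_destination = string_given[expected_symbol_idx:idx]
--             destination_list.append(cur_destination)
--             expected_symbol_idx = idx + 1
--
--     return destination_list
-- ===== SOURCE B (Python) =====
-- def separate_destinations(string_given):
--     delims = [(i, c) for i, c in enumerate(string_given) if c in "=/"]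
--     return [string_given[p + 1:i]
--             for (p, pc), (i, c) in zip(delims, delims[1:]) if pc == c]
-- ===== Notes on version B (the rewrite author's own statement) =====
-- stated objective: simpler
-- what changed: Replaced the single-pass scan with two boolean flags and a six-way branch by a two-phase form: collect the (index, char) delimiter events, then emit the slice between each adjacent pair of same-char delimiters.
import Mathlib
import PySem

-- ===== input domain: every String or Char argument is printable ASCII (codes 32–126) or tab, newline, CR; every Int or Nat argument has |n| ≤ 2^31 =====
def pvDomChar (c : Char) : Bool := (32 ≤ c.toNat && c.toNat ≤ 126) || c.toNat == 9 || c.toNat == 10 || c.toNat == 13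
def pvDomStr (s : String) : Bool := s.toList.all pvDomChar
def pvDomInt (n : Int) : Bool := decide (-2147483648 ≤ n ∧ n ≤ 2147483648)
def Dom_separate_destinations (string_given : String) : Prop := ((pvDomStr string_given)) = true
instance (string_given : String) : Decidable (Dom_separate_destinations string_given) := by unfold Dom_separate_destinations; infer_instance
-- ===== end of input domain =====

-- B replaces A's two boolean flags and six-way branch by a two-phase form: collect the
-- (index, char) delimiter events, then emit the slice between each adjacent same-char pair
-- (objective: simpler; same O(n) cost).

-- ===== PORT A =====
-- state: equal_expected, slash_expected, expected_symbol_idx, destination_list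
def sdLoopA (s : List Char) : List (Int × Char) → Bool → Bool → Int → List String → List String
  | [], _, _, _, acc => acc
  | (idx, symbol) :: rest, eq, sl, e, acc =>
    -- first if/elif chain (the '=' branches)
    let st1 : Bool × Bool × Int × List String :=
      if symbol = '=' ∧ ¬ sl ∧ ¬ eq then (true, sl, idx + 1, acc)
      else if symbol = '=' ∧ sl then (true, false, idx + 1, acc)
      else if symbol = '=' ∧ eq then
        (eq, sl, idx + 1, acc ++ [String.ofList (PySem.List.slice s (some e) (some idx))])
      else (eq, sl, e, acc)
    -- second if/elif chain (the '/' branches), on the updated state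
    let st2 : Bool × Bool × Int × List String :=
      if symbol = '/' ∧ ¬ st1.2.1 ∧ ¬ st1.1 then (st1.1, true, idx + 1, st1.2.2.2)
      else if symbol = '/' ∧ st1.1 then (false, true, idx + 1, st1.2.2.2)
      else if symbol = '/' ∧ st1.2.1 then
        (st1.1, st1.2.1, idx + 1,
          st1.2.2.2 ++ [String.ofList (PySem.List.slice s (some st1.2.2.1) (some idx))])
      else st1
    sdLoopA s rest st2.1 st2.2.1 st2.2.2.1 st2.2.2.2

def separate_destinations (string_given : String) : List String :=
  sdLoopA string_given.toList (PySem.List.enumerate string_given.toList 0) false false 0 []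

-- ===== PORT B =====
def separate_destinations_alt (string_given : String) : List String :=
  let delims := (PySem.List.enumerate string_given.toList 0).filter
    (fun p => decide (p.2 = '=' ∨ p.2 = '/'))
  (delims.zip delims.tail).filterMap (fun q =>
    if q.1.2 = q.2.2 then
      some (String.ofList (PySem.List.slice string_given.toList (some (q.1.1 + 1)) (some q.2.1)))
    else none)

-- ===== PRECONDITION & SPEC =====
def Spec_separate_destinations (string_given : String) (out : List String) : Prop := out = separate_destinations_alt string_given
instance (string_given : String) (out : List String) : Decidable (Spec_separate_destinations string_given out) := by unfold Spec_separate_destinations; infer_instance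

-- ===== CLAIM (what is proved, stated in full; the proofs are below) =====
def Claim_equal_separate_destinations : Prop := ∀ (string_given : String), Dom_separate_destinations string_given → Spec_separate_destinations string_given (separate_destinations string_given)

-- ===== LEMMAS AND PROOFS =====

-- emit the slice between each adjacent same-char delimiter pair
def pwEmit (s : List Char) : List (Int × Char) → List String
  | a :: b :: t =>
    (if a.2 = b.2 then [String.ofList (PySem.List.slice s (some (a.1 + 1)) (some b.1))] else [])
      ++ pwEmit s (b :: t)
  | _ => []

theorem zip_filterMap_eq_pwEmit (s : List Char) :
    ∀ ds : List (Int × Char),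
      (ds.zip ds.tail).filterMap (fun q =>
        if q.1.2 = q.2.2 then
          some (String.ofList (PySem.List.slice s (some (q.1.1 + 1)) (some q.2.1)))
        else none) = pwEmit s ds
  | [] => rfl
  | [_] => rfl
  | a :: b :: t => by
    simp only [List.tail_cons, List.zip_cons_cons, List.filterMap_cons, pwEmit]
    rw [← zip_filterMap_eq_pwEmit s (b :: t)]
    by_cases h : a.2 = b.2 <;> simp [h]

def eqOf : Option (Int × Char) → Bool
  | some (_, c) => c == '='
  | none => false

def slOf : Option (Int × Char) → Bool
  | some (_, c) => c == '/'
  | none => false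

def eOf : Option (Int × Char) → Int
  | some (j, _) => j + 1
  | none => 0

theorem okEq (i : Int) : ∀ j c, (some (i, '=') : Option (Int × Char)) = some (j, c) → c = '=' ∨ c = '/' := by
  rintro j c h
  simp only [Option.some.injEq, Prod.mk.injEq] at h
  exact Or.inl h.2.symm

theorem okSl (i : Int) : ∀ j c, (some (i, '/') : Option (Int × Char)) = some (j, c) → c = '=' ∨ c = '/' := by
  rintro j c h
  simp only [Option.some.injEq, Prod.mk.injEq] at h
  exact Or.inr h.2.symm

theorem sdLoopA_inv (s : List Char) :
    ∀ (rest : List (Int × Char)) (prev : Option (Int × Char)) (acc : List String),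
      (∀ j c, prev = some (j, c) → c = '=' ∨ c = '/') →
      sdLoopA s rest (eqOf prev) (slOf prev) (eOf prev) acc
        = acc ++ pwEmit s (prev.toList ++ rest.filter (fun p => decide (p.2 = '=' ∨ p.2 = '/'))) := by
  intro rest
  induction rest with
  | nil =>
    intro prev acc hp
    rcases prev with _ | ⟨j, c⟩ <;> simp [sdLoopA, pwEmit]
  | cons hd t ih =>
    intro prev acc hp
    obtain ⟨i, c⟩ := hd
    by_cases hc1 : c = '='
    · subst hc1
      rcases prev with _ | ⟨j, pc⟩
      · have hih := ih (some (i, '=')) acc (okEq i)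
        simp only [eqOf, slOf, eOf] at hih
        simp only [sdLoopA, eqOf, slOf, eOf]
        simp_all [pwEmit]
      · rcases hp j pc rfl with h | h <;> subst h
        · have hih := ih (some (i, '='))
            (acc ++ [String.ofList (PySem.List.slice s (some (j + 1)) (some i))]) (okEq i)
          simp only [eqOf, slOf, eOf] at hih
          simp only [sdLoopA, eqOf, slOf, eOf]
          simp_all [pwEmit]
        · have hih := ih (some (i, '=')) acc (okEq i)
          simp only [eqOf, slOf, eOf] at hih
          simp only [sdLoopA, eqOf, slOf, eOf]
          simp_all [pwEmit]
    · by_cases hc2 : c = '/'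
      · subst hc2
        rcases prev with _ | ⟨j, pc⟩
        · have hih := ih (some (i, '/')) acc (okSl i)
          simp only [eqOf, slOf, eOf] at hih
          simp only [sdLoopA, eqOf, slOf, eOf]
          simp_all [pwEmit]
        · rcases hp j pc rfl with h | h <;> subst h
          · have hih := ih (some (i, '/')) acc (okSl i)
            simp only [eqOf, slOf, eOf] at hih
            simp only [sdLoopA, eqOf, slOf, eOf]
            simp_all [pwEmit]
          · have hih := ih (some (i, '/'))
              (acc ++ [String.ofList (PySem.List.slice s (some (j + 1)) (some i))]) (okSl i)
            simp only [eqOf, slOf, eOf] at hih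
            simp only [sdLoopA, eqOf, slOf, eOf]
            simp_all [pwEmit]
      · simp only [sdLoopA]
        have hih := ih prev acc hp
        simp_all

-- ===== VERDICT (by name: the statement is the Claim_ definition above) =====
theorem separate_destinations_spec : Claim_equal_separate_destinations := by
  intro string_given _
  unfold Spec_separate_destinations separate_destinations separate_destinations_alt
  rw [zip_filterMap_eq_pwEmit]
  have := sdLoopA_inv string_given.toList
    (PySem.List.enumerate string_given.toList 0) none [] (by intro _ _ h; simp_all)
  simpa [eqOf, slOf, eOf] using this
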